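-- pv_equiv track=rewrite | github.com/annkon22/chapter5 | discussion.py | hash1
-- ===== SOURCE A (Python) =====
-- def hash1(a_string, table_size):
--     sum = 0
--     pos = 0
--
--     for char in a_string:
--         weight = a_string[:pos].count(char)
--         sum = sum + weight + ord(char)
--         pos += 1
--
--
--     return sum % table_size
-- ===== SOURCE B (Python) =====
-- def hash1(a_string, table_size):
--     counts = {}
--     for char in a_string:
--         counts[char] = counts.get(char, 0) + 1
--     total = 0
--     for char in a_string:
--         total += ord(char)
--     for n in counts.values():
--         total += n * (n - 1) // 2
--     return total % table_size
-- ===== Notes on version B (the rewrite author's own statement) =====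
-- stated objective: faster
-- what changed: Replaces the per-position prefix slice+count scan with one frequency-table pass plus the closed-form triangular sum n*(n-1)//2 per distinct character.
import Mathlib
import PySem

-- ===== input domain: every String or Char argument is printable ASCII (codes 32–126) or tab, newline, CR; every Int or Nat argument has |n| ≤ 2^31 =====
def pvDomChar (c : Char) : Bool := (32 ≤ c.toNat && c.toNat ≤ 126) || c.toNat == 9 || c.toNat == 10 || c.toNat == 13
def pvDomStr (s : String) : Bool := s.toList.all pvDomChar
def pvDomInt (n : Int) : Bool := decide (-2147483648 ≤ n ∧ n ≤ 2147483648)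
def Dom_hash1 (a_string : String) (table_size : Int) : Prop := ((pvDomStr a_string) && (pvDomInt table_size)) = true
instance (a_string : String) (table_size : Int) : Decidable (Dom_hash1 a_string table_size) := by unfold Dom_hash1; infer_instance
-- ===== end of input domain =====

-- B replaces A's per-position prefix-slice count with a frequency table plus the
-- closed-form triangular sum n*(n-1)//2 per distinct character (measured faster on large inputs).


-- ===== PORT A =====
def hash1 (a_string : String) (table_size : Int) : Int :=
  let st := a_string.toList.foldl
    (fun (st : Int × Int) char =>
      let weight : Int :=
        (PySem.List.count (PySem.List.slice a_string.toList none (some st.2)) char : Int)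
      (st.1 + weight + (char.toNat : Int), st.2 + 1))
    (0, 0)
  PySem.Int.mod st.1 table_size

-- ===== PORT B =====
def hash1_alt (a_string : String) (table_size : Int) : Int :=
  let counts : PySem.Dict Char Int :=
    a_string.toList.foldl (fun d char => d.insert char (d.getD char 0 + 1)) PySem.Dict.empty
  let total1 : Int := a_string.toList.foldl (fun t char => t + (char.toNat : Int)) 0
  let total2 : Int := counts.values.foldl (fun t n => t + PySem.Int.floordiv (n * (n - 1)) 2) total1
  PySem.Int.mod total2 table_size

-- ===== PRECONDITION & SPEC =====
-- Python raises ZeroDivisionError on '% table_size' when table_size = 0.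
def Pre_hash1 (a_string : String) (table_size : Int) : Prop := table_size ≠ 0
instance (a_string : String) (table_size : Int) : Decidable (Pre_hash1 a_string table_size) := by unfold Pre_hash1; infer_instance
def pvWitness_hash1 : String × Int := ("cat", 11)
def Spec_hash1 (a_string : String) (table_size : Int) (out : Int) : Prop := out = hash1_alt a_string table_size
instance (a_string : String) (table_size : Int) (out : Int) : Decidable (Spec_hash1 a_string table_size out) := by unfold Spec_hash1; infer_instance

-- ===== CLAIM (what is proved, stated in full; the proofs are below) =====
def Claim_equal_hash1 : Prop := ∀ (a_string : String) (table_size : Int), Dom_hash1 a_string table_size → Pre_hash1 a_string table_size → Spec_hash1 a_string table_size (hash1 a_string table_size)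

-- ===== LEMMAS AND PROOFS =====

-- triangular weight of a character occurring m times
def pvTri (m : Nat) : Int := ((m * (m - 1) / 2 : Nat) : Int)

-- sum of A's per-step contributions over `rest`, given already-seen prefix `done`
def pvWsum : List Char → List Char → Int
  | _, [] => 0
  | done, c :: rest => (done.count c : Int) + (c.toNat : Int) + pvWsum (done ++ [c]) rest

-- B's closed form
def pvBform (l : List Char) : Int :=
  (l.map (fun c => (c.toNat : Int))).sum + ∑ x ∈ l.toFinset, pvTri (l.count x)

theorem pvTri_succ (n : Nat) : pvTri (n + 1) = pvTri n + (n : Int) := by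
  unfold pvTri
  have h : (n + 1) * (n + 1 - 1) = n * (n - 1) + 2 * n := by
    cases n with
    | zero => rfl
    | succ k => simp only [Nat.add_sub_cancel]; ring
  rw [h, Nat.add_mul_div_left _ _ (by omega : 0 < 2)]
  push_cast; ring

theorem pvTri_cast (m : Nat) :
    PySem.Int.floordiv ((m : Int) * ((m : Int) - 1)) 2 = pvTri m := by
  cases m with
  | zero => simp [pvTri]
  | succ k =>
    have h : ((k + 1 : Nat) : Int) * (((k + 1 : Nat) : Int) - 1) = (((k + 1) * k : Nat) : Int) := by
      push_cast
      ring
    have h2 : PySem.Int.floordiv (((k + 1) * k : Nat) : Int) 2 = (((k + 1) * k / 2 : Nat) : Int) := by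
      exact_mod_cast PySem.Int.floordiv_natCast ((k + 1) * k) 2
    rw [h, h2]
    simp [pvTri]

theorem pvTsum_append (d : List Char) (c : Char) :
    (∑ x ∈ (d ++ [c]).toFinset, pvTri ((d ++ [c]).count x))
      = (∑ x ∈ d.toFinset, pvTri (d.count x)) + (d.count c : Int) := by
  have hfin : (d ++ [c]).toFinset = insert c d.toFinset := by
    ext x; simp
  have hcnt : ∀ x, (d ++ [c]).count x = d.count x + (if x = c then 1 else 0) := by
    intro x
    rw [List.count_append, List.count_singleton]
    by_cases hx : x = c
    · simp [hx]
    · simp [hx, Ne.symm hx]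
  rw [hfin]
  have hins : insert c d.toFinset = insert c (d.toFinset.erase c) := by
    ext x; by_cases hx : x = c <;> simp [hx]
  rw [hins, Finset.sum_insert (Finset.notMem_erase c _)]
  have hrest : (∑ x ∈ d.toFinset.erase c, pvTri ((d ++ [c]).count x))
      = ∑ x ∈ d.toFinset.erase c, pvTri (d.count x) := by
    apply Finset.sum_congr rfl
    intro x hx
    have hxc : x ≠ c := (Finset.mem_erase.mp hx).1
    rw [hcnt x, if_neg hxc, Nat.add_zero]
  rw [hrest, hcnt c, if_pos rfl, pvTri_succ]
  by_cases hc : c ∈ d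
  · have hcF : c ∈ d.toFinset := List.mem_toFinset.mpr hc
    rw [← Finset.add_sum_erase d.toFinset _ hcF]
    ring
  · have hcF : c ∉ d.toFinset := fun h => hc (List.mem_toFinset.mp h)
    rw [Finset.erase_eq_of_notMem hcF, List.count_eq_zero.mpr hc]
    simp [pvTri]

theorem pvBform_append (d : List Char) (c : Char) :
    pvBform (d ++ [c]) = pvBform d + ((d.count c : Int) + (c.toNat : Int)) := by
  unfold pvBform
  rw [pvTsum_append]
  simp
  ring

theorem pvWsum_bform : ∀ (rest done : List Char),
    pvBform done + pvWsum done rest = pvBform (done ++ rest) := by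
  intro rest
  induction rest with
  | nil => intro done; simp [pvWsum]
  | cons c rest ih =>
    intro done
    have := ih (done ++ [c])
    rw [pvWsum, ← add_assoc] at *
    calc pvBform done + ((done.count c : Int) + (c.toNat : Int)) + pvWsum (done ++ [c]) rest
        = pvBform (done ++ [c]) + pvWsum (done ++ [c]) rest := by
          rw [pvBform_append]
      _ = pvBform ((done ++ [c]) ++ rest) := ih (done ++ [c])
      _ = pvBform (done ++ c :: rest) := by simp

theorem pvLoopA (full : List Char) : ∀ (rest done : List Char) (s : Int),
    full = done ++ rest →
    (rest.foldl
      (fun (st : Int × Int) char =>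
        (st.1 + (PySem.List.count (PySem.List.slice full none (some st.2)) char : Int)
           + (char.toNat : Int), st.2 + 1))
      (s, (done.length : Int))).1
    = s + pvWsum done rest := by
  intro rest
  induction rest with
  | nil => intro done s _; simp [pvWsum]
  | cons c rest ih =>
    intro done s h
    rw [List.foldl_cons]
    have hslice : PySem.List.slice full none (some (done.length : Int)) = done := by
      rw [PySem.List.slice_to_natCast, h, List.take_left]
    have hlen : (done.length : Int) + 1 = ((done ++ [c]).length : Int) := by
      simp
    rw [hslice, PySem.List.count_eq, hlen]
    have h' : full = (done ++ [c]) ++ rest := by simp [h]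
    rw [ih (done ++ [c]) _ h', pvWsum]
    ring

theorem pvValues_counter (l : List Char) :
    (PySem.Dict.counter l).values = (PySem.Set.ofList l).map (fun k => ((l.count k : Nat) : Int)) := by
  show ((PySem.Dict.counter l).items).map (fun x => x.2) = _
  rw [PySem.Dict.items_counter, List.map_map]
  rfl

theorem pvB_total (l : List Char) :
    ((PySem.Dict.counter l).values.foldl (fun t n => t + PySem.Int.floordiv (n * (n - 1)) 2)
      (l.foldl (fun t char => t + (char.toNat : Int)) 0)) = pvBform l := by
  rw [PySem.List.foldl_add, PySem.List.foldl_add, pvValues_counter, List.map_map]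
  have h1 : ((PySem.Set.ofList l).map
      ((fun n => PySem.Int.floordiv (n * (n - 1)) 2) ∘ fun k => ((l.count k : Nat) : Int))).sum
      = ((PySem.Set.ofList l).map (fun k => pvTri (l.count k))).sum := by
    apply congrArg
    apply List.map_congr_left
    intro x _
    exact pvTri_cast (l.count x)
  rw [h1]
  have h2 : ((PySem.Set.ofList l).map (fun k => pvTri (l.count k))).sum
      = ∑ x ∈ l.toFinset, pvTri (l.count x) := by
    have hfin : (PySem.Set.ofList l).toFinset = l.toFinset := by
      ext x; simp [PySem.Set.mem_ofList]
    rw [← List.sum_toFinset _ (PySem.Set.nodup_ofList l), hfin]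
  rw [h2]
  unfold pvBform
  ring

-- ===== VERDICT (by name: the statement is the Claim_ definition above) =====
theorem hash1_spec : Claim_equal_hash1 := by
  intro a_string table_size _ _
  unfold Spec_hash1 hash1 hash1_alt
  dsimp only
  rw [PySem.Dict.foldl_insert_getD_add_one_eq_counter]
  have hA := pvLoopA a_string.toList a_string.toList [] 0 rfl
  simp only [List.length_nil, Nat.cast_zero] at hA
  rw [hA, pvB_total a_string.toList]
  have := pvWsum_bform a_string.toList []
  simp only [List.nil_append] at this
  rw [← this]
  simp [pvBform]
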